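-- pv_equiv track=rewrite | github.com/major-scale/anim-counting | scripts/imagination_rollout_binary.py | carry_depth
-- ===== SOURCE A (Python) =====
-- def carry_depth(n):
--     """Number of consecutive carries from bit 0 when going from n to n+1."""
--     d = 0
--     for b in range(4):
--         if (n >> b) & 1 == 1:
--             d += 1
--         else:
--             break
--     return d
-- ===== SOURCE B (Python) =====
-- def carry_depth(n):
--     """Number of consecutive carries from bit 0 when going from n to n+1."""
--     t = ~n & 0xF
--     if t == 0:
--         return 4
--     return (t & -t).bit_length() - 1
-- ===== Notes on version B (the rewrite author's own statement) =====
-- stated objective: idiomatic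
-- what changed: Replaces the bit-scanning loop (test each low bit, break at the first zero) by a closed-form bit trick: complement the low nibble, then read off the index of its lowest set bit with bit_length, returning the cap when the nibble is all ones.
import Mathlib
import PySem

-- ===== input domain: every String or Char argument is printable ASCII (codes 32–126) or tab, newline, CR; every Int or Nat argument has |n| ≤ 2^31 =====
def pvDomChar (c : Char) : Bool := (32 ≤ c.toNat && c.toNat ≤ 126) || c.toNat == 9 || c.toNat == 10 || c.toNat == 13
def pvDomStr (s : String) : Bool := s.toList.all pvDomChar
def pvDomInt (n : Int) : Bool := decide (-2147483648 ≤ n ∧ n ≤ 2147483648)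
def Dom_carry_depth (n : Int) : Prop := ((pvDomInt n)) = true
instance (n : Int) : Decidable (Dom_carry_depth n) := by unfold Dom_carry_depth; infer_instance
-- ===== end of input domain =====

-- B replaces A's bit-scanning loop by a closed-form bit trick (~n & 0xF, lowest set bit, bit_length); objective: idiomatic/alternative.

-- ===== PORT A =====
-- the 'for b in range(4): if (n >> b) & 1 == 1: d += 1 else: break' loop;
-- b.toNat is exact here since range(4) yields only nonnegative b
def carry_depth_loop (n : Int) : List Int → Int → Int
  | [], d => d
  | b :: rest, d =>
      if PySem.Int.band (n >>> b.toNat) 1 = 1 then carry_depth_loop n rest (d + 1) else d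

def carry_depth (n : Int) : Int :=
  carry_depth_loop n (PySem.List.pyRange 0 4 1) 0

-- ===== PORT B =====
def carry_depth_alt (n : Int) : Int :=
  let t := PySem.Int.band (Int.not n) 15
  if t = 0 then 4
  else (PySem.Int.bitLength (PySem.Int.band t (-t)) : Int) - 1

-- ===== PRECONDITION & SPEC =====
def Spec_carry_depth (n : Int) (out : Int) : Prop := out = carry_depth_alt n
instance (n : Int) (out : Int) : Decidable (Spec_carry_depth n out) := by unfold Spec_carry_depth; infer_instance

-- ===== CLAIM (what is proved, stated in full; the proofs are below) =====
def Claim_equal_carry_depth : Prop := ∀ (n : Int), Dom_carry_depth n → Spec_carry_depth n (carry_depth n)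

-- ===== LEMMAS AND PROOFS =====

lemma and15 (m : Nat) : m &&& 15 = m % 16 := by
  simpa using Nat.and_two_pow_sub_one_eq_mod m 4

lemma band15 (a : Int) : PySem.Int.band a 15 = a % 16 := by
  unfold PySem.Int.band
  split
  · rw [if_pos (by norm_num)]
    show ((a.toNat &&& (15:Int).toNat : Nat) : Int) = _
    rw [show (15:Int).toNat = 15 from rfl, and15]
    push_cast; omega
  · rw [if_pos (by norm_num)]
    show (((15:Int).toNat - ((15:Int).toNat &&& (-a-1).toNat) : Nat) : Int) = _
    rw [show (15:Int).toNat = 15 from rfl, Nat.land_comm, and15]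
    omega

lemma notE (n : Int) : Int.not n = -n - 1 := by
  cases n with
  | ofNat m => show Int.negSucc m = _; simp [Int.negSucc_eq]; ring
  | negSucc m => show (m : Int) = _; simp [Int.negSucc_eq]

lemma cbit (n : Int) (b : Nat) : PySem.Int.band (n >>> b) 1 = n / (2 ^ b : Nat) % 2 := by
  rw [PySem.Int.band_one, PySem.Int.mod_eq_emod_of_pos (by norm_num : (0:Int) < 2),
    Int.shiftRight_eq_div_pow]

lemma range04 : PySem.List.pyRange 0 4 1 = [0, 1, 2, 3] := by decide

theorem carry_depth_spec : Claim_equal_carry_depth := by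
  intro n _
  show carry_depth n = carry_depth_alt n
  have h0 : 0 ≤ n % 16 := Int.emod_nonneg _ (by norm_num)
  have h1 : n % 16 < 16 := Int.emod_lt_of_pos _ (by norm_num)
  have hneg : (-n - 1) % 16 = 15 - n % 16 := by omega
  simp only [carry_depth, range04, carry_depth_loop, cbit, carry_depth_alt, band15, notE, hneg]
  norm_num [show ((2:Int).toNat) = 2 from rfl, show ((3:Int).toNat) = 3 from rfl]
  have hc : n % 16 = 0 ∨ n % 16 = 1 ∨ n % 16 = 2 ∨ n % 16 = 3 ∨ n % 16 = 4 ∨ n % 16 = 5 ∨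
      n % 16 = 6 ∨ n % 16 = 7 ∨ n % 16 = 8 ∨ n % 16 = 9 ∨ n % 16 = 10 ∨ n % 16 = 11 ∨
      n % 16 = 12 ∨ n % 16 = 13 ∨ n % 16 = 14 ∨ n % 16 = 15 := by omega
  rcases hc with h|h|h|h|h|h|h|h|h|h|h|h|h|h|h|h <;> rw [h] <;> norm_num <;>
    split_ifs <;> first | omega | decide
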